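-- pv_equiv track=rewrite | github.com/Avijit-D/keyboard-layout | random_sampling.py | convert_layout_to_rows
-- ===== SOURCE A (Python) =====
-- def convert_layout_to_rows(layout):
--     """Convert coordinate-based layout back to row format"""
--     # Group letters by y-coordinate (row)
--     rows = {1: [], 2: [], 3: []}
--
--     for letter, (x, y) in layout.items():
--         if y in rows:
--             rows[y].append((x, letter))
--
--     # Sort each row by x-coordinate and extract just the letters
--     row_strings = []
--     for row_num in [1, 2, 3]:
--         sorted_letters = [letter for _, letter in sorted(rows[row_num])]
--         row_strings.append(''.join(sorted_letters))
--
--     return row_strings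
-- ===== SOURCE B (Python) =====
-- def convert_layout_to_rows(layout):
--     """Convert coordinate-based layout back to row format"""
--     # One global stable sort of all entries by (x, letter), then a single
--     # pass distributing each letter to its row accumulator.
--     entries = sorted(((x, letter, y) for letter, (x, y) in layout.items()),
--                      key=lambda t: (t[0], t[1]))
--     r1, r2, r3 = [], [], []
--     for _x, letter, y in entries:
--         if y == 1:
--             r1.append(letter)
--         elif y == 2:
--             r2.append(letter)
--         elif y == 3:
--             r3.append(letter)
--     return [''.join(r1), ''.join(r2), ''.join(r3)]
-- ===== Notes on version B (the rewrite author's own statement) =====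
-- stated objective: alternative
-- what changed: B replaces A's group-then-sort pipeline (a row dict filled first, then three separate (x, letter) sorts joined per row) with one global stable sort of all entries by (x, letter) followed by a single pass distributing each letter into three plain row accumulators; Pre_ only excludes association lists with a duplicated letter key, which no Python dict can produce (dict construction collapses duplicates), so no actual Python input is excluded.
import Mathlib
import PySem

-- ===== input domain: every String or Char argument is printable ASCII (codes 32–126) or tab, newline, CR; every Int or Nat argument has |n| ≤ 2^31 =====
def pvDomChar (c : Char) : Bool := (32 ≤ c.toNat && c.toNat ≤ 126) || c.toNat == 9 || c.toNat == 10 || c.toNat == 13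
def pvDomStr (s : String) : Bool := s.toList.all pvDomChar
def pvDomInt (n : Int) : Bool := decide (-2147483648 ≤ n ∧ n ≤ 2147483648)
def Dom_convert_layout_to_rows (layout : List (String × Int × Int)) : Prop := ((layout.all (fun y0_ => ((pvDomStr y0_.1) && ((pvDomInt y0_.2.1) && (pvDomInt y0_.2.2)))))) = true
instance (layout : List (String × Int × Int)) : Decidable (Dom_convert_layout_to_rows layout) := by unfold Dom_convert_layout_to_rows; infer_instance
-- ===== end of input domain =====

-- B replaces A's group-then-sort-each-row pipeline by one global stable sort by (x, letter)
-- followed by a single distributing pass (alternative decomposition, same cost).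


-- ===== PORT A =====
-- A-side helper: the loop body 'if y in rows: rows[y].append((x, letter))'
def pvStepA (d : PySem.Dict Int (List (Int × String))) (p : String × Int × Int) :
    PySem.Dict Int (List (Int × String)) :=
  if d.contains p.2.2 then d.modify p.2.2 [] (fun l => l ++ [(p.2.1, p.1)]) else d

def convert_layout_to_rows (layout : List (String × Int × Int)) : List String :=
  let rows0 : PySem.Dict Int (List (Int × String)) := PySem.Dict.ofList [(1, []), (2, []), (3, [])]
  let rows := layout.foldl pvStepA rows0
  ([1, 2, 3] : List Int).foldl (fun rs r =>
    rs ++ [PySem.Str.join ""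
      ((PySem.List.sorted2 (rows.getD r []) (fun q => q.1) (fun q => q.2)).map (fun q => q.2))]) []

-- ===== PORT B =====
-- B-side helper: the distributing loop body (if y == 1 … elif y == 2 … elif y == 3 …)
def pvStepB (acc : List String × List String × List String) (t : Int × String × Int) :
    List String × List String × List String :=
  if t.2.2 = 1 then (acc.1 ++ [t.2.1], acc.2.1, acc.2.2)
  else if t.2.2 = 2 then (acc.1, acc.2.1 ++ [t.2.1], acc.2.2)
  else if t.2.2 = 3 then (acc.1, acc.2.1, acc.2.2 ++ [t.2.1])
  else acc

def convert_layout_to_rows_alt (layout : List (String × Int × Int)) : List String :=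
  let entries := PySem.List.sorted2 (layout.map (fun p => (p.2.1, p.1, p.2.2)))
                   (fun t => t.1) (fun t => t.2.1)
  let acc := entries.foldl pvStepB ([], [], [])
  [PySem.Str.join "" acc.1, PySem.Str.join "" acc.2.1, PySem.Str.join "" acc.2.2]

-- ===== PRECONDITION & SPEC =====
-- Pre_ excludes only association lists with a duplicated letter key: such a list does not
-- represent any Python dict (dict construction collapses duplicate keys), so A's behaviour
-- on it is not defined by the Python source; no actual Python input is excluded.
def Pre_convert_layout_to_rows (layout : List (String × Int × Int)) : Prop :=
  (layout.map Prod.fst).Nodup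
instance (layout : List (String × Int × Int)) : Decidable (Pre_convert_layout_to_rows layout) := by
  unfold Pre_convert_layout_to_rows; infer_instance

def pvWitness_convert_layout_to_rows : (List (String × Int × Int)) :=
  [("q", (1, 1)), ("w", (0, 1)), ("a", (0, 2)), ("z", (0, 3)), ("!", (5, 7))]

def Spec_convert_layout_to_rows (layout : List (String × Int × Int)) (out : List String) : Prop := out = convert_layout_to_rows_alt layout
instance (layout : List (String × Int × Int)) (out : List String) : Decidable (Spec_convert_layout_to_rows layout out) := by unfold Spec_convert_layout_to_rows; infer_instance

-- ===== CLAIM (what is proved, stated in full; the proofs are below) =====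
def Claim_equal_convert_layout_to_rows : Prop := ∀ (layout : List (String × Int × Int)), Dom_convert_layout_to_rows layout → Pre_convert_layout_to_rows layout → Spec_convert_layout_to_rows layout (convert_layout_to_rows layout)

-- ===== LEMMAS AND PROOFS =====

-- sorted2 with Int/String keys is the one-key stable sort under the lexicographic key.
theorem sorted2_eq_sorted_lex {α : Type} (xs : List α) (k1 : α → Int) (k2 : α → String) :
    PySem.List.sorted2 xs k1 k2 = PySem.List.sorted xs (fun a => toLex (k1 a, k2 a)) := by
  rw [PySem.List.sorted_eq_foldl_insertBy]
  unfold PySem.List.sorted2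
  simp only [if_neg (by decide : ¬ (false = true))]
  congr 1
  funext acc x
  congr 1
  funext a b
  rw [Bool.eq_iff_iff]
  simp only [Bool.or_eq_true, Bool.and_eq_true, Bool.not_eq_true', decide_eq_true_eq,
    decide_eq_false_iff_not, Prod.Lex.lt_iff, ofLex_toLex]
  constructor
  · rintro (h | ⟨h1, h2⟩)
    · exact Or.inl h
    · by_cases h3 : k1 a < k1 b
      · exact Or.inl h3
      · exact Or.inr ⟨le_antisymm (not_lt.mp h1) (not_lt.mp h3), h2⟩
  · rintro (h | ⟨h1, h2⟩)
    · exact Or.inl h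
    · exact Or.inr ⟨by rw [h1]; exact lt_irrefl _, h2⟩

theorem pairwise_lt_of_pairwise_le_nodup {α κ : Type} [LinearOrder κ] (l : List α) (key : α → κ)
    (h1 : l.Pairwise (fun a b => key a ≤ key b)) (h2 : (l.map key).Nodup) :
    l.Pairwise (fun a b => key a < key b) := by
  induction l with
  | nil => exact List.Pairwise.nil
  | cons x t ih =>
    rw [List.pairwise_cons] at h1 ⊢
    rw [List.map_cons, List.nodup_cons] at h2
    refine ⟨fun b hb => lt_of_le_of_ne (h1.1 b hb) ?_, ih h1.2 h2.2⟩
    intro he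
    exact h2.1 (he ▸ List.mem_map_of_mem hb)

theorem sorted2_eq_of_perm_of_pairwise_lt {α : Type} (xs ys : List α) (k1 : α → Int) (k2 : α → String)
    (hp : ys.Perm xs) (hlt : ys.Pairwise (fun a b => toLex (k1 a, k2 a) < toLex (k1 b, k2 b))) :
    PySem.List.sorted2 xs k1 k2 = ys := by
  rw [sorted2_eq_sorted_lex]
  exact PySem.List.sorted_eq_of_perm_of_pairwise_lt xs ys (fun a => toLex (k1 a, k2 a)) hp hlt

-- the (x, letter) pairs of row r, in input order
def rowPairs (r : Int) (layout : List (String × Int × Int)) : List (Int × String) :=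
  (layout.filter (fun p => decide (p.2.2 = r))).map (fun p => (p.2.1, p.1))

theorem foldA_shape (layout : List (String × Int × Int)) :
    ∀ (l1 l2 l3 : List (Int × String)),
    layout.foldl pvStepA (PySem.Dict.mk [(1, l1), (2, l2), (3, l3)]) =
      PySem.Dict.mk [(1, l1 ++ rowPairs 1 layout), (2, l2 ++ rowPairs 2 layout),
                     (3, l3 ++ rowPairs 3 layout)] := by
  induction layout with
  | nil => intro l1 l2 l3; simp [rowPairs]
  | cons p t ih =>
    intro l1 l2 l3
    by_cases h1 : p.2.2 = 1
    · have hs : pvStepA (PySem.Dict.mk [(1, l1), (2, l2), (3, l3)]) p =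
          PySem.Dict.mk [(1, l1 ++ [(p.2.1, p.1)]), (2, l2), (3, l3)] := by
        simp [pvStepA, PySem.Dict.contains, PySem.Dict.modify, PySem.Dict.insert,
          PySem.Dict.getD, PySem.Dict.get?, h1]
      simp only [List.foldl_cons, hs, ih, rowPairs, List.filter_cons, h1]
      simp [List.append_assoc]
    · by_cases h2 : p.2.2 = 2
      · have hs : pvStepA (PySem.Dict.mk [(1, l1), (2, l2), (3, l3)]) p =
            PySem.Dict.mk [(1, l1), (2, l2 ++ [(p.2.1, p.1)]), (3, l3)] := by
          simp [pvStepA, PySem.Dict.contains, PySem.Dict.modify, PySem.Dict.insert,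
            PySem.Dict.getD, PySem.Dict.get?, h2]
        simp only [List.foldl_cons, hs, ih, rowPairs, List.filter_cons, h2]
        simp [List.append_assoc]
      · by_cases h3 : p.2.2 = 3
        · have hs : pvStepA (PySem.Dict.mk [(1, l1), (2, l2), (3, l3)]) p =
              PySem.Dict.mk [(1, l1), (2, l2), (3, l3 ++ [(p.2.1, p.1)])] := by
            simp [pvStepA, PySem.Dict.contains, PySem.Dict.modify, PySem.Dict.insert,
              PySem.Dict.getD, PySem.Dict.get?, h3]
          simp only [List.foldl_cons, hs, ih, rowPairs, List.filter_cons, h3]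
          simp [List.append_assoc]
        · have hc : (PySem.Dict.mk [(1, l1), (2, l2), (3, l3)]).contains p.2.2 = false := by
            simp [PySem.Dict.contains]
            omega
          have hs : pvStepA (PySem.Dict.mk [(1, l1), (2, l2), (3, l3)]) p =
              PySem.Dict.mk [(1, l1), (2, l2), (3, l3)] := by
            simp [pvStepA, hc]
          simp only [List.foldl_cons, hs, ih, rowPairs, List.filter_cons, h1, h2, h3]
          simp

-- the letters of row r among es, in order
def rowLetters (r : Int) (es : List (Int × String × Int)) : List String :=
  (es.filter (fun t => decide (t.2.2 = r))).map (fun t => t.2.1)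

theorem foldB_shape (es : List (Int × String × Int)) :
    ∀ (a1 a2 a3 : List String),
    es.foldl pvStepB (a1, a2, a3) =
      (a1 ++ rowLetters 1 es, a2 ++ rowLetters 2 es, a3 ++ rowLetters 3 es) := by
  induction es with
  | nil => intro a1 a2 a3; simp [rowLetters]
  | cons t ts ih =>
    intro a1 a2 a3
    by_cases h1 : t.2.2 = 1
    · simp only [List.foldl_cons, pvStepB, ih, rowLetters, List.filter_cons, h1]
      simp [List.append_assoc]
    · by_cases h2 : t.2.2 = 2
      · simp only [List.foldl_cons, pvStepB, ih, rowLetters, List.filter_cons, h2]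
        simp [List.append_assoc]
      · by_cases h3 : t.2.2 = 3
        · simp only [List.foldl_cons, pvStepB, ih, rowLetters, List.filter_cons, h3]
          simp [List.append_assoc]
        · simp only [List.foldl_cons, pvStepB, ih, rowLetters, List.filter_cons, h1, h2, h3]
          simp

-- A's sorted row r equals B's global sort filtered to row r (letters are distinct keys).
theorem row_eq (layout : List (String × Int × Int)) (hnd : (layout.map Prod.fst).Nodup) (r : Int) :
    PySem.List.sorted2 (rowPairs r layout) (fun q => q.1) (fun q => q.2) =
      ((PySem.List.sorted2 (layout.map (fun p => (p.2.1, p.1, p.2.2)))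
          (fun t => t.1) (fun t => t.2.1)).filter (fun t => decide (t.2.2 = r))).map
        (fun t => (t.1, t.2.1)) := by
  set trip : (String × Int × Int) → Int × String × Int := fun p => (p.2.1, p.1, p.2.2) with htrip
  set E := PySem.List.sorted2 (layout.map trip) (fun t => t.1) (fun t => t.2.1) with hE
  have hperm : E.Perm (layout.map trip) := PySem.List.sorted2_perm _ _ _ _
  -- strict pairwise order on E under the lexicographic (x, letter) key
  have hle : E.Pairwise (fun a b => (fun t => toLex (t.1, t.2.1)) a ≤ (fun t => toLex (t.1, t.2.1)) b) := by
    rw [hE, sorted2_eq_sorted_lex]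
    exact PySem.List.sorted_pairwise _ _
  have hmapnd : (E.map (fun t => toLex (t.1, t.2.1))).Nodup := by
    have hp2 : (E.map (fun t => toLex (t.1, t.2.1))).Perm
        ((layout.map trip).map (fun t => toLex (t.1, t.2.1))) := hperm.map _
    refine hp2.nodup_iff.mpr ?_
    rw [List.map_map]
    have : ((fun t : Int × String × Int => toLex (t.1, t.2.1)) ∘ trip) =
        fun p : String × Int × Int => toLex (p.2.1, p.1) := rfl
    rw [this]
    refine List.Nodup.of_map (fun l : Lex (Int × String) => (ofLex l).2) ?_
    rw [List.map_map]
    exact hnd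
  have hlt : E.Pairwise (fun a b => toLex (a.1, a.2.1) < toLex (b.1, b.2.1)) :=
    pairwise_lt_of_pairwise_le_nodup E (fun t => toLex (t.1, t.2.1)) hle hmapnd
  apply sorted2_eq_of_perm_of_pairwise_lt
  · -- permutation
    have h1 : (E.filter (fun t => decide (t.2.2 = r))).Perm
        ((layout.map trip).filter (fun t => decide (t.2.2 = r))) := hperm.filter _
    have h2 := h1.map (fun t : Int × String × Int => (t.1, t.2.1))
    refine h2.trans ?_
    rw [List.filter_map, List.map_map]
    exact List.Perm.refl _
  · -- strict pairwise on the mapped, filtered list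
    rw [List.pairwise_map]
    exact (hlt.filter _)

-- ===== VERDICT (by name: the statement is the Claim_ definition above) =====
theorem convert_layout_to_rows_spec : Claim_equal_convert_layout_to_rows := by
  intro layout _ hnd
  unfold Spec_convert_layout_to_rows
  simp only [convert_layout_to_rows, convert_layout_to_rows_alt]
  have h0 : (PySem.Dict.ofList [(1, []), (2, []), (3, [])] : PySem.Dict Int (List (Int × String))) =
      PySem.Dict.mk [(1, []), (2, []), (3, [])] := rfl
  rw [h0, foldA_shape layout [] [] []]
  rw [foldB_shape _ [] [] []]
  have hg1 : ∀ (a b c : List (Int × String)),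
      (PySem.Dict.mk [((1:Int), a), (2, b), (3, c)]).getD 1 [] = a := by
    intro a b c; simp [PySem.Dict.getD, PySem.Dict.get?]
  have hg2 : ∀ (a b c : List (Int × String)),
      (PySem.Dict.mk [((1:Int), a), (2, b), (3, c)]).getD 2 [] = b := by
    intro a b c; simp [PySem.Dict.getD, PySem.Dict.get?]
  have hg3 : ∀ (a b c : List (Int × String)),
      (PySem.Dict.mk [((1:Int), a), (2, b), (3, c)]).getD 3 [] = c := by
    intro a b c; simp [PySem.Dict.getD, PySem.Dict.get?]
  simp only [List.foldl_cons, List.foldl_nil, List.nil_append, hg1, hg2, hg3]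
  have hrow : ∀ r : Int,
      ((PySem.List.sorted2 (rowPairs r layout) (fun q => q.1) (fun q => q.2)).map (fun q => q.2)) =
        rowLetters r (PySem.List.sorted2 (layout.map (fun p => (p.2.1, p.1, p.2.2)))
          (fun t => t.1) (fun t => t.2.1)) := by
    intro r
    rw [row_eq layout hnd r, List.map_map]
    rfl
  rw [hrow 1, hrow 2, hrow 3]
  simp
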